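-- pv_equiv track=rewrite | github.com/jay1224-jay/LineBot_Homework_With_Python | homework_physics/views.py | display_wave
-- ===== SOURCE A (Python) =====
-- def display_wave(length):
--
--     s = ""
--     high = 7
--
--     end_flag = 0
--     c = 0
--     while ( not end_flag ):
--         for i in range(1, high+1):
--             s += "\\" * (i-1) + "\\\n"
--             c+=1
--             if c >= length:
--                 end_flag = 1
--                 break
--
--         if end_flag:
--             break
--         for i in range(high, 0, -1):
--             s += "/" * (i-1) + "/\n"
--             c+=1
--             if c >= length:
--                 end_flag = 1
--                 break
--
--     return s
-- ===== SOURCE B (Python) =====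
-- def display_wave(length):
--     n = max(length, 1)
--     lines = []
--     for idx in range(n):
--         m = idx % 14
--         lines.append("\\" * (m + 1) + "\n" if m < 7 else "/" * (14 - m) + "\n")
--     return "".join(lines)
-- ===== Notes on version B (the rewrite author's own statement) =====
-- stated objective: simpler
-- what changed: A's while loop with two inner for loops, a shared counter, an end_flag and breaks is replaced by one flat loop over line indices that derives each line directly from the index modulo the 14-line period, joined at the end.
import Mathlib
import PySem

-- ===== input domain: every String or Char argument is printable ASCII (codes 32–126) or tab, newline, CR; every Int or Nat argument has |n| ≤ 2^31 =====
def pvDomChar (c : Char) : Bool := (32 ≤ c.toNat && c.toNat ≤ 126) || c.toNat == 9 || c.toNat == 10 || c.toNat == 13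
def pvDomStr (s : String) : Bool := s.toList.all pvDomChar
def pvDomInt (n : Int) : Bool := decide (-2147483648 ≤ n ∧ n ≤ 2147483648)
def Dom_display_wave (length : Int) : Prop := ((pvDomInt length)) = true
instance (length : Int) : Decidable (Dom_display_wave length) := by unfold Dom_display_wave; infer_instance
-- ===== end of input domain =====

-- B replaces A's while/for/break machinery by one flat indexed loop computing each line
-- from its index modulo 14 (objective: simpler).

-- ===== PORT A =====
-- s += "\\" * (i-1) + "\\\n"
def pvLineUp (i : Int) : String := String.mk (List.replicate (i - 1).toNat '\\') ++ "\\\n"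
-- s += "/" * (i-1) + "/\n"
def pvLineDown (i : Int) : String := String.mk (List.replicate (i - 1).toNat '/') ++ "/\n"

-- for i in range(1, high+1): append line; c += 1; break with flag if c >= length
def pvForUp : List Int → Int → String → Int → String × Int × Bool
  | [], _, s, c => (s, c, false)
  | i :: rest, length, s, c =>
      if c + 1 ≥ length then (s ++ pvLineUp i, c + 1, true)
      else pvForUp rest length (s ++ pvLineUp i) (c + 1)

-- for i in range(high, 0, -1): append line; c += 1; break with flag if c >= length
def pvForDown : List Int → Int → String → Int → String × Int × Bool
  | [], _, s, c => (s, c, false)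
  | i :: rest, length, s, c =>
      if c + 1 ≥ length then (s ++ pvLineDown i, c + 1, true)
      else pvForDown rest length (s ++ pvLineDown i) (c + 1)

-- while (not end_flag): the up-for, break check, the down-for, break check.
-- Fuel only makes the recursion structural; each outer pass emits 14 lines and the
-- break fires once c >= length, so fuel length.toNat + 1 is never exhausted.
def pvWhileA : Nat → Int → String → Int → String
  | 0, _, s, _ => s
  | fuel + 1, length, s, c =>
      let r1 := pvForUp (PySem.List.pyRange 1 (7 + 1) 1) length s c
      if r1.2.2 then r1.1
      else
        let r2 := pvForDown (PySem.List.pyRange 7 0 (-1)) length r1.1 r1.2.1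
        if r2.2.2 then r2.1
        else pvWhileA fuel length r2.1 r2.2.1

def display_wave (length : Int) : String := pvWhileA (length.toNat + 1) length "" 0

-- ===== PORT B =====
-- loop body: m = idx % 14; "\\"*(m+1)+"\n" if m < 7 else "/"*(14-m)+"\n"
def pvLineB (idx : Nat) : String :=
  let m := idx % 14
  if m < 7 then String.mk (List.replicate (m + 1) '\\') ++ "\n"
  else String.mk (List.replicate (14 - m) '/') ++ "\n"

def display_wave_alt (length : Int) : String :=
  let n := max length 1
  String.join ((List.range n.toNat).map pvLineB)

-- ===== PRECONDITION & SPEC =====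
def Spec_display_wave (length : Int) (out : String) : Prop := out = display_wave_alt length
instance (length : Int) (out : String) : Decidable (Spec_display_wave length out) := by unfold Spec_display_wave; infer_instance

-- ===== CLAIM (what is proved, stated in full; the proofs are below) =====
def Claim_equal_display_wave : Prop := ∀ (length : Int), Dom_display_wave length → Spec_display_wave length (display_wave length)

-- ===== LEMMAS AND PROOFS =====

-- B's output as a function of the number of lines still owed
def pvTail (r : Int) : String := String.join ((List.range (max r 1).toNat).map pvLineB)

theorem pvTail_alt (length : Int) : display_wave_alt length = pvTail length := rfl

theorem pvFoldl_append (l : List String) (a : String) :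
    l.foldl (fun r s => r ++ s) a = a ++ l.foldl (fun r s => r ++ s) "" := by
  induction l generalizing a with
  | nil => simp
  | cons x xs ih =>
      simp only [List.foldl_cons]
      rw [ih (a ++ x), ih (("" : String) ++ x)]
      simp [String.append_assoc]

theorem pvJoin_append (a b : List String) : String.join (a ++ b) = String.join a ++ String.join b := by
  simp only [String.join, List.foldl_append]
  rw [pvFoldl_append b (List.foldl (fun r s => r ++ s) "" a)]

-- pvTail steps by a full period of 14 lines
theorem pvTail_step (r : Int) (h : r > 14) :
    pvTail r = String.join ((List.range 14).map pvLineB) ++ pvTail (r - 14) := by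
  unfold pvTail
  have h1 : (max r 1).toNat = 14 + (max (r - 14) 1).toNat := by omega
  rw [h1, List.range_add, List.map_append, pvJoin_append]
  congr 1
  congr 1
  rw [List.map_map]
  apply List.map_congr_left
  intro k hk
  simp only [Function.comp, pvLineB]
  have : (14 + k) % 14 = k % 14 := by omega
  rw [this]

-- the up-for runs to completion when no break fires
theorem pvForUp_all (L : List Int) (length : Int) (s : String) (c : Int)
    (h : c + L.length < length) :
    pvForUp L length s c = (s ++ String.join (L.map pvLineUp), c + L.length, false) := by
  induction L generalizing s c with
  | nil => simp [pvForUp, String.join]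
  | cons i rest ih =>
      simp only [pvForUp, List.length_cons] at h ⊢
      rw [if_neg (by push_cast at h ⊢; omega)]
      rw [ih (s ++ pvLineUp i) (c + 1) (by push_cast at h ⊢; omega)]
      simp only [List.map_cons, String.join, List.foldl_cons]
      rw [pvFoldl_append (List.map pvLineUp rest) (("" : String) ++ pvLineUp i)]
      simp only [Prod.mk.injEq]
      refine ⟨?_, ?_, trivial⟩
      · simp [String.append_assoc]
      · push_cast; omega

theorem pvForDown_all (L : List Int) (length : Int) (s : String) (c : Int)
    (h : c + L.length < length) :
    pvForDown L length s c = (s ++ String.join (L.map pvLineDown), c + L.length, false) := by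
  induction L generalizing s c with
  | nil => simp [pvForDown, String.join]
  | cons i rest ih =>
      simp only [pvForDown, List.length_cons] at h ⊢
      rw [if_neg (by push_cast at h ⊢; omega)]
      rw [ih (s ++ pvLineDown i) (c + 1) (by push_cast at h ⊢; omega)]
      simp only [List.map_cons, String.join, List.foldl_cons]
      rw [pvFoldl_append (List.map pvLineDown rest) (("" : String) ++ pvLineDown i)]
      simp only [Prod.mk.injEq]
      refine ⟨?_, ?_, trivial⟩
      · simp [String.append_assoc]
      · push_cast; omega

-- the up-for breaks after max(length-c,1) lines when that many fit
theorem pvForUp_break (L : List Int) (length : Int) (s : String) (c : Int)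
    (h1 : length - c ≤ L.length) (h2 : L ≠ []) :
    pvForUp L length s c =
      (s ++ String.join ((L.take (max (length - c) 1).toNat).map pvLineUp),
       c + max (length - c) 1, true) := by
  induction L generalizing s c with
  | nil => exact absurd rfl h2
  | cons i rest ih =>
      simp only [pvForUp]
      by_cases hc : c + 1 ≥ length
      · rw [if_pos hc]
        have hm : (max (length - c) 1).toNat = 1 := by omega
        rw [hm]
        simp only [List.take_succ_cons, List.take_zero, List.map_cons, List.map_nil,
          String.join, List.foldl_cons, List.foldl_nil]
        simp only [Prod.mk.injEq]
        refine ⟨?_, ?_, trivial⟩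
        · simp
        · omega
      · rw [if_neg hc]
        have hrest : rest ≠ [] := by
          intro hn; subst hn; simp at h1; omega
        rw [ih (s ++ pvLineUp i) (c + 1) (by simp at h1 ⊢; omega) hrest]
        have hm : (max (length - c) 1).toNat = (max (length - (c + 1)) 1).toNat + 1 := by omega
        rw [hm]
        simp only [List.take_succ_cons, List.map_cons, String.join, List.foldl_cons]
        rw [pvFoldl_append (List.map pvLineUp (rest.take (max (length - (c+1)) 1).toNat)) (("" : String) ++ pvLineUp i)]
        simp only [Prod.mk.injEq]
        refine ⟨?_, ?_, trivial⟩
        · simp [String.append_assoc]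
        · omega

theorem pvForDown_break (L : List Int) (length : Int) (s : String) (c : Int)
    (h1 : length - c ≤ L.length) (h2 : L ≠ []) :
    pvForDown L length s c =
      (s ++ String.join ((L.take (max (length - c) 1).toNat).map pvLineDown),
       c + max (length - c) 1, true) := by
  induction L generalizing s c with
  | nil => exact absurd rfl h2
  | cons i rest ih =>
      simp only [pvForDown]
      by_cases hc : c + 1 ≥ length
      · rw [if_pos hc]
        have hm : (max (length - c) 1).toNat = 1 := by omega
        rw [hm]
        simp only [List.take_succ_cons, List.take_zero, List.map_cons, List.map_nil,
          String.join, List.foldl_cons, List.foldl_nil]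
        simp only [Prod.mk.injEq]
        refine ⟨?_, ?_, trivial⟩
        · simp
        · omega
      · rw [if_neg hc]
        have hrest : rest ≠ [] := by
          intro hn; subst hn; simp at h1; omega
        rw [ih (s ++ pvLineDown i) (c + 1) (by simp at h1 ⊢; omega) hrest]
        have hm : (max (length - c) 1).toNat = (max (length - (c + 1)) 1).toNat + 1 := by omega
        rw [hm]
        simp only [List.take_succ_cons, List.map_cons, String.join, List.foldl_cons]
        rw [pvFoldl_append (List.map pvLineDown (rest.take (max (length - (c+1)) 1).toNat)) (("" : String) ++ pvLineDown i)]
        simp only [Prod.mk.injEq]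
        refine ⟨?_, ?_, trivial⟩
        · simp [String.append_assoc]
        · omega

-- the 14 lines of one full pass equal B's first 14 lines
theorem pvBlock_full :
    String.join ((PySem.List.pyRange 1 8 1).map pvLineUp) ++
      String.join ((PySem.List.pyRange 7 0 (-1)).map pvLineDown) =
    String.join ((List.range 14).map pvLineB) := by decide

-- one full pass of A's while body when no break fires
theorem pvWhileA_step (fuel : Nat) (length c : Int) (s : String) (h : length - c > 14) :
    pvWhileA (fuel + 1) length s c =
      pvWhileA fuel length (s ++ String.join ((List.range 14).map pvLineB)) (c + 14) := by
  rw [pvWhileA]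
  rw [pvForUp_all _ length s c (by simp; omega)]
  simp only [show ((PySem.List.pyRange 1 (7+1) 1).length) = 7 from by decide]
  rw [pvForDown_all _ length _ _ (by simp [show ((PySem.List.pyRange 7 0 (-1)).length) = 7 from by decide]; omega)]
  simp only [show ((PySem.List.pyRange 7 0 (-1)).length) = 7 from by decide]
  norm_num
  rw [show ((c + 7 : Int) + 7) = c + 14 from by omega, String.append_assoc, pvBlock_full]

-- the first k ≤ 7 up-lines equal B's first k lines
theorem pvBlock_up (k : Nat) (h1 : 1 ≤ k) (h2 : k ≤ 7) :
    String.join (((PySem.List.pyRange 1 8 1).map pvLineUp).take k) =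
    String.join ((List.range k).map pvLineB) := by
  interval_cases k <;> decide

-- all 7 up-lines plus the first k ≤ 7 down-lines equal B's first 7+k lines
theorem pvBlock_down (k : Nat) (h1 : 1 ≤ k) (h2 : k ≤ 7) :
    String.join ((PySem.List.pyRange 1 8 1).map pvLineUp) ++
      String.join (((PySem.List.pyRange 7 0 (-1)).map pvLineDown).take k) =
    String.join ((List.range (7 + k)).map pvLineB) := by
  interval_cases k <;> decide

-- the final (partial or full) pass, when the break fires within 14 lines
theorem pvWhileA_small (fuel : Nat) (length c : Int) (s : String) (h : length - c ≤ 14) :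
    pvWhileA (fuel + 1) length s c = s ++ pvTail (length - c) := by
  rw [pvWhileA]
  by_cases h7 : length - c ≤ 7
  · rw [pvForUp_break _ length s c (by simp; omega) (by decide)]
    simp only []
    norm_num
    rw [pvBlock_up (max (length - c) 1).toNat (by omega) (by omega)]
    unfold pvTail
    rfl
  · rw [pvForUp_all _ length s c (by simp; omega)]
    simp only [show ((PySem.List.pyRange 1 (7+1) 1).length) = 7 from by decide]
    rw [pvForDown_break _ length _ _ (by simp [show ((PySem.List.pyRange 7 0 (-1)).length) = 7 from by decide]; omega) (by decide)]
    norm_num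
    rw [String.append_assoc]
    rw [show (max (length - (c + 7)) 1).toNat = (max (length - c) 1).toNat - 7 from by omega]
    rw [pvBlock_down ((max (length - c) 1).toNat - 7) (by omega) (by omega)]
    rw [show 7 + ((max (length - c) 1).toNat - 7) = (max (length - c) 1).toNat from by omega]
    unfold pvTail
    rfl

theorem pvWhileA_main (fuel : Nat) : ∀ (length c : Int) (s : String), length - c ≤ 14 * fuel + 14 →
    pvWhileA (fuel + 1) length s c = s ++ pvTail (length - c) := by
  induction fuel with
  | zero => intro length c s h; exact pvWhileA_small 0 length c s (by omega)
  | succ n ih =>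
      intro length c s h
      by_cases h14 : length - c ≤ 14
      · exact pvWhileA_small (n + 1) length c s h14
      · rw [pvWhileA_step (n + 1) length c s (by omega)]
        rw [ih length (c + 14) _ (by omega)]
        rw [show length - (c + 14) = (length - c) - 14 from by omega]
        rw [pvTail_step (length - c) (by omega), String.append_assoc]

-- ===== VERDICT (by name: the statement is the Claim_ definition above) =====
theorem display_wave_spec : Claim_equal_display_wave := by
  intro length _
  unfold Spec_display_wave display_wave
  rw [pvWhileA_main length.toNat length 0 "" (by omega), pvTail_alt]
  simp
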